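-- pv_equiv track=rewrite | github.com/tundrv0l/Group-12-Prod | backend/solvers/util/methods.py | maximal_elements
-- ===== SOURCE A (Python) =====
-- def maximal_elements(set_, relation):
--     maximals = set()
--     for a in set_:
--         for b in set_ - {a}:
--             if (a, b) in relation:
--                 break
--         else:
--             maximals.add(a)
--
--     return maximals
-- ===== SOURCE B (Python) =====
-- def maximal_elements(set_, relation):
--     dominated = {a for (a, b) in relation if b != a and b in set_}
--     return set_ - dominated
-- ===== Notes on version B (the rewrite author's own statement) =====
-- stated objective: faster
-- what changed: Replaces the per-element inner scan over set_ with one pass over the relation building the set of dominated elements, then a single set difference.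
import Mathlib
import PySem

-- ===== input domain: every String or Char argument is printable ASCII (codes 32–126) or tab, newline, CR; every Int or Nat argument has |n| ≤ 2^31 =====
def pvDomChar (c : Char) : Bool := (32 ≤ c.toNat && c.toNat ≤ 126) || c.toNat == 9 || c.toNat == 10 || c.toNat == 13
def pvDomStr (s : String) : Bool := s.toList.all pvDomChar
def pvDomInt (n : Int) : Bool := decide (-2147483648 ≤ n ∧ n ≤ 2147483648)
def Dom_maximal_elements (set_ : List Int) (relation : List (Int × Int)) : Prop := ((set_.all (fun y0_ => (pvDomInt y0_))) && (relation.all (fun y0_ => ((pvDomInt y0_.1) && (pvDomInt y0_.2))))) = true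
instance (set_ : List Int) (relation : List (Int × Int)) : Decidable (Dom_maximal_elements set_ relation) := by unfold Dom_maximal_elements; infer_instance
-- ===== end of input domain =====

-- B replaces A's quadratic per-element scan by one pass over the relation and a set difference (measurably faster).

-- ===== PORT A =====
-- A: for each a in set_, scan set_ - {a} for a b with (a,b) in relation (for/else-break = any);
-- add a to the result set when none is found.
def maximal_elements (set_ : List Int) (relation : List (Int × Int)) : List Int :=
  set_.foldl
    (fun maximals a =>
      if (PySem.Set.diff set_ [a]).any (fun b => relation.contains (a, b)) then
        maximals
      else
        PySem.Set.add maximals a)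
    PySem.Set.empty

-- ===== PORT B =====
-- B: dominated = {a for (a, b) in relation if b != a and b in set_}; return set_ - dominated.
def maximal_elements_alt (set_ : List Int) (relation : List (Int × Int)) : List Int :=
  let dominated : PySem.Set Int :=
    PySem.Set.ofList ((relation.filter (fun p => p.2 != p.1 && set_.contains p.2)).map (fun p => p.1))
  PySem.Set.diff set_ dominated

-- ===== PRECONDITION & SPEC =====
-- Pre_ requires set_ to hold distinct elements: both parameters are Python SETS, so the list
-- modelling set_ holds its distinct elements (the type convention for set[int]).
def Pre_maximal_elements (set_ : List Int) (relation : List (Int × Int)) : Prop := set_.Nodup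
instance (set_ : List Int) (relation : List (Int × Int)) : Decidable (Pre_maximal_elements set_ relation) := by unfold Pre_maximal_elements; infer_instance
def pvWitness_maximal_elements : List Int × (List (Int × Int)) := ([1, 2, 3], [(1, 2), (2, 2)])

def Spec_maximal_elements (set_ : List Int) (relation : List (Int × Int)) (out : List Int) : Prop := out = maximal_elements_alt set_ relation
instance (set_ : List Int) (relation : List (Int × Int)) (out : List Int) : Decidable (Spec_maximal_elements set_ relation out) := by unfold Spec_maximal_elements; infer_instance

-- ===== CLAIM (what is proved, stated in full; the proofs are below) =====
def Claim_equal_maximal_elements : Prop := ∀ (set_ : List Int) (relation : List (Int × Int)), Dom_maximal_elements set_ relation → Pre_maximal_elements set_ relation → Spec_maximal_elements set_ relation (maximal_elements set_ relation)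

-- ===== LEMMAS AND PROOFS =====

-- A's accumulator loop, when the traversed list has no duplicates and is disjoint from the
-- accumulator, appends exactly the elements failing the test.
theorem pv_foldl_add_filter (P : Int → Bool) :
    ∀ (l acc : List Int), l.Nodup → (∀ a ∈ l, a ∉ acc) →
      l.foldl (fun m a => if P a then m else PySem.Set.add m a) acc
        = acc ++ l.filter (fun a => !P a) := by
  intro l
  induction l with
  | nil => simp
  | cons a l ih =>
    intro acc hnd hdisj
    rcases List.nodup_cons.mp hnd with ⟨ha, hl⟩
    have hdisj' : ∀ x ∈ l, x ∉ acc := fun x hx => hdisj x (List.mem_cons_of_mem _ hx)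
    cases hP : P a
    · have hadd : PySem.Set.add acc a = acc ++ [a] :=
        PySem.Set.add_of_not_mem (hdisj a (List.mem_cons_self ..))
      have hih := ih (acc ++ [a]) hl (fun x hx => by
        simp only [List.mem_append, List.mem_singleton]
        rintro (h | rfl)
        · exact hdisj' x hx h
        · exact ha hx)
      simp [hP, hadd, hih]
    · simp [hP, ih acc hl hdisj']

-- The membership tests of A and B agree pointwise.
theorem pv_cond_eq (set_ : List Int) (relation : List (Int × Int)) (a : Int) :
    (PySem.Set.diff set_ [a]).any (fun b => relation.contains (a, b))
      = PySem.Set.contains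
          (PySem.Set.ofList ((relation.filter (fun p => p.2 != p.1 && set_.contains p.2)).map (fun p => p.1))) a := by
  rw [Bool.eq_iff_iff]
  simp only [List.any_eq_true, PySem.Set.mem_diff, PySem.Set.contains_iff,
    PySem.Set.mem_ofList, List.mem_map, List.mem_filter, List.contains_eq_mem,
    Bool.and_eq_true, bne_iff_ne, decide_eq_true_eq, List.mem_singleton, ne_eq]
  constructor
  · rintro ⟨b, ⟨hb, hba⟩, hrel⟩
    exact ⟨(a, b), ⟨hrel, by simpa using hba, hb⟩, rfl⟩
  · rintro ⟨⟨x, b⟩, ⟨hrel, hne, hb⟩, rfl⟩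
    exact ⟨b, ⟨hb, by simpa using hne⟩, hrel⟩

-- ===== VERDICT (by name: the statement is the Claim_ definition above) =====
theorem maximal_elements_spec : Claim_equal_maximal_elements := by
  intro set_ relation _ hpre
  unfold Spec_maximal_elements maximal_elements maximal_elements_alt
  rw [pv_foldl_add_filter _ set_ PySem.Set.empty hpre (by intro a _ h; cases h),
    show PySem.Set.empty = ([] : List Int) from rfl, List.nil_append]
  show _ = PySem.Set.diff set_ _
  exact (List.filter_congr (fun a _ => congrArg Bool.not (pv_cond_eq set_ relation a)))
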